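-- pv_equiv track=rewrite | github.com/lenaindelaforetmagique/ProjectEuler | Python/PE169.py | f
-- ===== SOURCE A (Python) =====
-- def f(n):
--     """iteratif :
--     on remarque que sur un nombre en binaire :
--     - ajouter 1 à la fin(=2n+1) ne change rien
--     - ajouter 0 à la fin(=2n) peut s'écrire:
--        - (n)0 > on compte donc f(n)
--        - ou bien (n-1)2 > on compte donc f(n-1)
--
--     on garde en mémoire Na(=f(n-1)) et Nb(=f(n)) """
--     s = bin(n)[2:]
--     p = 1
--     t = 1
--     Na = 0
--     Nb = 1
--
--     for i, c in enumerate(s):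
--         if c == "0":
--             Nb = Nb + Na
--         else:
--             Na = Nb + Na
--
--     return Nb
-- ===== SOURCE B (Python) =====
-- def f(n):
--     """Recursive halving recurrence with memoization:
--     g(0)=1; g(m)=g(m//2) if m odd; g(m)=g(m//2)+g(m//2-1) if m even."""
--     memo = {0: 1}
--     def g(m):
--         if m in memo:
--             return memo[m]
--         h = g(m // 2)
--         r = h if m % 2 == 1 else h + g(m // 2 - 1)
--         memo[m] = r
--         return r
--     return g(n)
-- ===== Notes on version B (the rewrite author's own statement) =====
-- stated objective: alternative
-- what changed: Replaces A's left-to-right pass over the bin(n) string with the memoized halving recurrence g(0)=1, g(odd m)=g(m//2), g(even m)=g(m//2)+g(m//2-1), recursing on the value itself instead of iterating over a bit string.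
-- outside the precondition, e.g. on f(-5): A returns 3, B raises RecursionError
import Mathlib
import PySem

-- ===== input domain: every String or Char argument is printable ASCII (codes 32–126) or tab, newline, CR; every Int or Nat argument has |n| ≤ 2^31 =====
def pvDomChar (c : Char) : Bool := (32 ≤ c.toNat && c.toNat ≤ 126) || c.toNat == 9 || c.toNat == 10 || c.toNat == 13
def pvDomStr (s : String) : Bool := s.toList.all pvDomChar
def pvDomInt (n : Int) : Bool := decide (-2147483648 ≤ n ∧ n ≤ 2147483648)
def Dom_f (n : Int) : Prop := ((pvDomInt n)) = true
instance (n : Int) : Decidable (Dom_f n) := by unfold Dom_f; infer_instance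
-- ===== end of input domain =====

-- B replaces A's pass over the bin(n) string by the memoized halving recurrence; same cost, different decomposition.

-- ===== PORT A =====
-- binary digits of a positive number, most significant first (bin(m) without the '0b')
def fBits : Nat → List Char
  | 0 => []
  | (m+1) => fBits ((m+1)/2) ++ [if (m+1) % 2 == 1 then '1' else '0']
decreasing_by exact Nat.div_lt_self (Nat.succ_pos m) (by norm_num)

-- Python's bin(n) as a char list
def fBin (n : Int) : List Char :=
  if n < 0 then '-' :: '0' :: 'b' :: fBits (-n).toNat
  else if n = 0 then ['0', 'b', '0']
  else '0' :: 'b' :: fBits n.toNat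

-- the loop body of A: state (Na, Nb)
def fStep (st : Int × Int) (c : Char) : Int × Int :=
  if c = '0' then (st.1, st.2 + st.1) else (st.2 + st.1, st.2)

def f (n : Int) : Int :=
  let s := (fBin n).drop 2
  -- p = 1 and t = 1 in A are unused
  ((s.foldl fStep (0, 1)).2)

-- ===== PORT B =====
-- g(0)=1; g(m)=g(m//2) if m odd; g(m)=g(m//2)+g(m//2-1) if m even
-- (the Python memo dict is a pure cache and is not modelled)
def fG : Nat → Int
  | 0 => 1
  | (m+1) =>
    if (m+1) % 2 == 1 then fG ((m+1)/2)
    else fG ((m+1)/2) + fG ((m+1)/2 - 1)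
decreasing_by all_goals omega

def f_alt (n : Int) : Int := fG n.toNat

-- ===== PRECONDITION & SPEC =====
-- Pre_ excludes negative n, on which A returns a meaningless value computed from the
-- stray 'b' of bin(n)[2:] = 'b…' while B's halving recursion does not terminate (RecursionError).
def Pre_f (n : Int) : Prop := 0 ≤ n
instance (n : Int) : Decidable (Pre_f n) := by unfold Pre_f; infer_instance
def pvWitness_f : Int := 5
def Spec_f (n : Int) (out : Int) : Prop := out = f_alt n
instance (n : Int) (out : Int) : Decidable (Spec_f n out) := by unfold Spec_f; infer_instance

-- ===== CLAIM (what is proved, stated in full; the proofs are below) =====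
def Claim_equal_f : Prop := ∀ (n : Int), Dom_f n → Pre_f n → Spec_f n (f n)

-- ===== LEMMAS AND PROOFS =====

theorem fG_odd (q : Nat) : fG (2*q + 1) = fG q := by
  have h : (2*q + 1) % 2 = 1 := by omega
  have h2 : (2*q + 1) / 2 = q := by omega
  rw [show 2*q + 1 = (2*q) + 1 from rfl, fG, h, h2]
  simp

theorem fG_even (q : Nat) (hq : 1 ≤ q) : fG (2*q) = fG q + fG (q - 1) := by
  have h : (2*q - 1 + 1) % 2 = 0 := by omega
  have h2 : (2*q - 1 + 1) / 2 = q := by omega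
  rw [show 2*q = (2*q - 1) + 1 by omega, fG, h, h2]
  simp

theorem fBits_succ (m : Nat) (hm : 1 ≤ m) :
    fBits m = fBits (m/2) ++ [if m % 2 == 1 then '1' else '0'] := by
  obtain ⟨k, rfl⟩ := Nat.exists_eq_add_of_le hm
  rw [show 1 + k = k + 1 from by omega, fBits]

theorem fLoop_eq : ∀ m : Nat, 1 ≤ m →
    (fBits m).foldl fStep (0, 1) = (fG (m - 1), fG m) := by
  intro m
  induction m using Nat.strong_induction_on with
  | _ m ih =>
    intro hm
    rw [fBits_succ m hm, List.foldl_append]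
    rcases Nat.lt_or_ge m 2 with h2 | h2
    · -- m = 1
      interval_cases m
      simp [fBits, fStep, fG]
    · -- m ≥ 2, so q = m/2 ≥ 1
      have hq : 1 ≤ m / 2 := by omega
      have hlt : m / 2 < m := Nat.div_lt_self (by omega) (by norm_num)
      rw [ih (m/2) hlt hq]
      rcases Nat.even_or_odd m with he | ho
      · have hpar : m % 2 = 0 := Nat.even_iff.mp he
        have hb : (m % 2 == 1) = false := by simp [hpar]
        simp only [hb, List.foldl, fStep]
        norm_num
        have hfe := fG_even (m/2) hq
        have hm2 : 2 * (m/2) = m := by omega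
        rw [hm2] at hfe
        have hm1 : m - 1 = 2 * (m/2 - 1) + 1 := by omega
        rw [hfe, hm1, fG_odd]
        exact ⟨rfl, rfl⟩
      · have hpar : m % 2 = 1 := Nat.odd_iff.mp ho
        have hb : (m % 2 == 1) = true := by simp [hpar]
        simp only [hb, List.foldl, fStep]
        norm_num
        have hfe := fG_even (m/2) hq
        have hm1 : m - 1 = 2 * (m/2) := by omega
        have hmo : m = 2 * (m/2) + 1 := by omega
        rw [if_neg (by decide : ¬ ('1' : Char) = '0'), Prod.mk.injEq]
        refine ⟨?_, ?_⟩
        · rw [hm1, hfe]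
        · conv_rhs => rw [hmo]
          rw [fG_odd]

-- ===== VERDICT (by name: the statement is the Claim_ definition above) =====
theorem f_spec : Claim_equal_f := by
  intro n _ hn
  unfold Spec_f f f_alt fBin
  rcases eq_or_lt_of_le hn with h0 | hpos
  · rw [← h0]
    norm_num [List.foldl, fStep, List.drop]
    rw [show fG 0 = 1 from by rw [fG]]
  · have hneg : ¬ n < 0 := by omega
    have hnz : ¬ n = 0 := by omega
    simp only [if_neg hneg, if_neg hnz, List.drop]
    have h1 : 1 ≤ n.toNat := by omega
    rw [fLoop_eq n.toNat h1]
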